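-- pv_equiv track=rewrite | github.com/AlexFigas/advent-of-code | pyvent-2024/solutions/day20/part1.py | get_directional_sequence
-- ===== SOURCE A (Python) =====
-- directional_keypad = [[None, "^", "A"], ["<", "v", ">"]]
--
-- movements = {"^": (-1, 0), "v": (1, 0), "<": (0, -1), ">": (0, 1)}
--
-- def find_position(keypad, target):
--     for i, row in enumerate(keypad):
--         for j, key in enumerate(row):
--             if key == target:
--                 return (i, j)
--     return None
--
-- def bfs(start, goal, keypad):
--     from collections import deque
--
--     queue = deque([(start, "")])
--     visited = set()
--     visited.add(start)
--
--     while queue: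
--         (current_pos, path) = queue.popleft()
--         if current_pos == goal:
--             return path
--
--         for move, (di, dj) in movements.items():
--             ni, nj = current_pos[0] + di, current_pos[1] + dj
--             if (
--                 0 <= ni < len(keypad)
--                 and 0 <= nj < len(keypad[0])
--                 and keypad[ni][nj] is not None
--             ):
--                 next_pos = (ni, nj)
--                 if next_pos not in visited:
--                     visited.add(next_pos)
--                     queue.append((next_pos, path + move))
--     return None
--
-- def get_directional_sequence(sequence):
--     directional_sequence = ""
--     current_pos = find_position(directional_keypad, "A")
--
--     for char in sequence:
--         if char == "A":
--             directional_sequence += "A"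
--         else:
--             target_pos = find_position(directional_keypad, char)
--             path = bfs(current_pos, target_pos, directional_keypad)
--             directional_sequence += path + "A"
--             current_pos = target_pos
--
--     return directional_sequence
-- ===== SOURCE B (Python) =====
-- # Precomputed BFS movement table for the directional keypad: maps
-- # (current_key, target_key) to the exact path string A's BFS produces.
-- _DIR_TABLE = {
--     ('^', '^'): '', ('^', '<'): 'v<', ('^', 'v'): 'v', ('^', '>'): 'v>',
--     ('A', '^'): '<', ('A', '<'): 'v<<', ('A', 'v'): 'v<', ('A', '>'): 'v',
--     ('<', '^'): '>^', ('<', '<'): '', ('<', 'v'): '>', ('<', '>'): '>>',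
--     ('v', '^'): '^', ('v', '<'): '<', ('v', 'v'): '', ('v', '>'): '>',
--     ('>', '^'): '^<', ('>', '<'): '<<', ('>', 'v'): '<', ('>', '>'): '',
-- }
--
-- def get_directional_sequence(sequence):
--     parts = []
--     cur = 'A'
--     for ch in sequence:
--         if ch == 'A':
--             parts.append('A')
--         else:
--             parts.append(_DIR_TABLE[(cur, ch)] + 'A')
--             cur = ch
--     return ''.join(parts)
-- ===== Notes on version B (the rewrite author's own statement) =====
-- stated objective: faster
-- what changed: Replaces the per-character find_position scans and BFS with a single pass over the input that tracks the current key and looks each (current, target) pair up in a precomputed 20-entry movement table.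
import Mathlib
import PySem

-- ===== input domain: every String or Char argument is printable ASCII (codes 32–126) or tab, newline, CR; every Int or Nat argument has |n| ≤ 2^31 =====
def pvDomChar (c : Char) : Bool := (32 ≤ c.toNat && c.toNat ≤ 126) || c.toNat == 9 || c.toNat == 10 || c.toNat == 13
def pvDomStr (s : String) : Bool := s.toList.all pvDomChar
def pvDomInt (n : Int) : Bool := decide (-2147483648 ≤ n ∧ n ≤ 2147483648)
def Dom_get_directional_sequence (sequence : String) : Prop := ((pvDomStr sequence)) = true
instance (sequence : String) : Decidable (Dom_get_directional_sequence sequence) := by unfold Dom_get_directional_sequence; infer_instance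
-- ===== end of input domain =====

-- B replaces the per-character find_position scans and BFS by a precomputed
-- 20-entry (current, target) movement table consumed in a single pass.


-- ===== PORT A =====
def directionalKeypad : List (List (Option Char)) :=
  [[none, some '^', some 'A'], [some '<', some 'v', some '>']]

def movements : List (Char × Int × Int) :=
  [('^', (-1, 0)), ('v', (1, 0)), ('<', (0, -1)), ('>', (0, 1))]

def findPositionRow : List (Option Char) → Char → Int → Int → Option (Int × Int)
  | [], _, _, _ => none
  | k :: rest, target, i, j =>
      if k = some target then some (i, j) else findPositionRow rest target i (j + 1)

def findPositionRows : List (List (Option Char)) → Char → Int → Option (Int × Int)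
  | [], _, _ => none
  | row :: rest, target, i =>
      match findPositionRow row target i 0 with
      | some p => some p
      | none => findPositionRows rest target (i + 1)

def find_position (keypad : List (List (Option Char))) (target : Char) : Option (Int × Int) :=
  findPositionRows keypad target 0

-- BFS while-loop; fuel only makes the recursion structural (each call pops one
-- queue entry; on this 5-cell keypad at most 6 entries are ever enqueued, so
-- fuel 16 never runs out on any reachable call).
def bfsLoop (keypad : List (List (Option Char))) (goal : Int × Int) :
    Nat → List ((Int × Int) × List Char) → PySem.Set (Int × Int) → Option (List Char)
  | 0, _, _ => none
  | _ + 1, [], _ => none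
  | fuel + 1, (pos, path) :: rest, visited =>
      if pos = goal then some path
      else
        let r := movements.foldl
          (fun (st : List ((Int × Int) × List Char) × PySem.Set (Int × Int)) mv =>
            let ni := pos.1 + mv.2.1
            let nj := pos.2 + mv.2.2
            if 0 ≤ ni ∧ ni < PySem.List.len keypad ∧ 0 ≤ nj ∧
                nj < PySem.List.len (PySem.List.pyGetD keypad 0 []) ∧
                PySem.List.pyGetD (PySem.List.pyGetD keypad ni []) nj none ≠ none then
              if PySem.Set.contains st.2 (ni, nj) then st
              else (st.1 ++ [((ni, nj), path ++ [mv.1])], PySem.Set.add st.2 (ni, nj))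
            else st)
          (rest, visited)
        bfsLoop keypad goal fuel r.1 r.2

def bfs (start goal : Int × Int) (keypad : List (List (Option Char))) : Option (List Char) :=
  bfsLoop keypad goal 16 [(start, [])] (PySem.Set.ofList [start])

def get_directional_sequence (sequence : String) : String :=
  let r := sequence.toList.foldl
    (fun (st : List Char × (Int × Int)) ch =>
      if ch = 'A' then (st.1 ++ ['A'], st.2)
      else
        let target := find_position directionalKeypad ch
        let path := match target with
          | some tp => bfs st.2 tp directionalKeypad
          | none => none
        (st.1 ++ path.getD [] ++ ['A'], target.getD st.2))
    ([], (find_position directionalKeypad 'A').getD (0, 0))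
  String.ofList r.1

-- ===== PORT B =====
-- Precomputed movement table (the dict literal of Source B); [] is never reached
-- under Pre_ (in Python an unknown key would be a KeyError).
def dirTable : Char → Char → List Char
  | '^', '^' => [] | '^', '<' => ['v', '<'] | '^', 'v' => ['v'] | '^', '>' => ['v', '>']
  | 'A', '^' => ['<'] | 'A', '<' => ['v', '<', '<'] | 'A', 'v' => ['v', '<'] | 'A', '>' => ['v']
  | '<', '^' => ['>', '^'] | '<', '<' => [] | '<', 'v' => ['>'] | '<', '>' => ['>', '>']
  | 'v', '^' => ['^'] | 'v', '<' => ['<'] | 'v', 'v' => [] | 'v', '>' => ['>']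
  | '>', '^' => ['^', '<'] | '>', '<' => ['<', '<'] | '>', 'v' => ['<'] | '>', '>' => []
  | _, _ => []

def get_directional_sequence_alt (sequence : String) : String :=
  let r := sequence.toList.foldl
    (fun (st : List Char × Char) ch =>
      if ch = 'A' then (st.1 ++ ['A'], st.2)
      else (st.1 ++ dirTable st.2 ch ++ ['A'], ch))
    ([], 'A')
  String.ofList r.1

-- ===== PRECONDITION & SPEC =====
-- Pre_ excludes sequences with a character other than ^ v < > A: on such a
-- character A's find_position returns None, its BFS returns None, and
-- `path + "A"` raises TypeError.
def Pre_get_directional_sequence (sequence : String) : Prop :=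
  (sequence.toList.all fun c => c == '^' || c == 'v' || c == '<' || c == '>' || c == 'A') = true
instance (sequence : String) : Decidable (Pre_get_directional_sequence sequence) := by
  unfold Pre_get_directional_sequence; infer_instance

def pvWitness_get_directional_sequence : String := "<^A^^Av"

def Spec_get_directional_sequence (sequence : String) (out : String) : Prop :=
  out = get_directional_sequence_alt sequence
instance (sequence : String) (out : String) : Decidable (Spec_get_directional_sequence sequence out) := by
  unfold Spec_get_directional_sequence; infer_instance

-- ===== CLAIM (what is proved, stated in full; the proofs are below) =====
def Claim_equal_get_directional_sequence : Prop :=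
  ∀ (sequence : String), Dom_get_directional_sequence sequence →
    Pre_get_directional_sequence sequence →
    Spec_get_directional_sequence sequence (get_directional_sequence sequence)

-- ===== LEMMAS AND PROOFS =====
-- row position of each keypad key
def posOf (c : Char) : Int × Int :=
  if c = '^' then (0, 1) else if c = 'A' then (0, 2)
  else if c = '<' then (1, 0) else if c = 'v' then (1, 1) else (1, 2)

-- For every pair of keys, A's find_position/BFS agree with B's table entry.
theorem key_facts :
    (['^', 'v', '<', '>', 'A'].all fun cur =>
      ['^', 'v', '<', '>', 'A'].all fun c =>
        (c = 'A') ||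
          (find_position directionalKeypad c == some (posOf c) &&
            bfs (posOf cur) (posOf c) directionalKeypad == some (dirTable cur c))) = true := by
  decide

theorem fold_agree (l : List Char) (hl : ∀ c ∈ l, c ∈ ['^', 'v', '<', '>', 'A']) :
    ∀ (cur : Char), cur ∈ ['^', 'v', '<', '>', 'A'] → ∀ (acc : List Char),
      (l.foldl
        (fun (st : List Char × (Int × Int)) ch =>
          if ch = 'A' then (st.1 ++ ['A'], st.2)
          else
            let target := find_position directionalKeypad ch
            let path := match target with
              | some tp => bfs st.2 tp directionalKeypad
              | none => none
            (st.1 ++ path.getD [] ++ ['A'], target.getD st.2))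
        (acc, posOf cur)) =
      ((l.foldl
          (fun (st : List Char × Char) ch =>
            if ch = 'A' then (st.1 ++ ['A'], st.2)
            else (st.1 ++ dirTable st.2 ch ++ ['A'], ch))
          (acc, cur)).1,
       posOf (l.foldl
          (fun (st : List Char × Char) ch =>
            if ch = 'A' then (st.1 ++ ['A'], st.2)
            else (st.1 ++ dirTable st.2 ch ++ ['A'], ch))
          (acc, cur)).2) := by
  induction l with
  | nil => intro cur _ acc; simp
  | cons c rest ih =>
    intro cur hcur acc
    have hc : c ∈ ['^', 'v', '<', '>', 'A'] := hl c (by simp)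
    have hrest : ∀ x ∈ rest, x ∈ ['^', 'v', '<', '>', 'A'] := fun x hx => hl x (by simp [hx])
    by_cases hA : c = 'A'
    · subst hA
      simp only [List.foldl_cons, reduceIte]
      exact ih hrest cur hcur (acc ++ ['A'])
    · have hk := key_facts
      simp only [List.all_eq_true] at hk
      have h2 := hk cur hcur c hc
      rw [Bool.or_eq_true, Bool.and_eq_true, beq_iff_eq, beq_iff_eq, decide_eq_true_iff] at h2
      rcases h2 with h2 | ⟨hfp, hbfs⟩
      · exact absurd h2 hA
      · simp only [List.foldl_cons, if_neg hA, hfp, hbfs, Option.getD_some]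
        exact ih hrest c hc (acc ++ dirTable cur c ++ ['A'])

-- ===== VERDICT (by name: the statement is the Claim_ definition above) =====
theorem get_directional_sequence_spec : Claim_equal_get_directional_sequence := by
  intro s _ hpre
  have hpre' : ∀ c ∈ s.toList, c ∈ ['^', 'v', '<', '>', 'A'] := by
    intro c hc
    have h := List.all_eq_true.mp hpre c hc
    simp only [Bool.or_eq_true, beq_iff_eq] at h
    simp only [List.mem_cons, List.not_mem_nil, or_false]
    tauto
  have hstart : (find_position directionalKeypad 'A').getD (0, 0) = posOf 'A' := by decide
  simp only [Spec_get_directional_sequence, get_directional_sequence, get_directional_sequence_alt]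
  rw [hstart, fold_agree s.toList hpre' 'A' (by decide) []]
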